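-- pv_equiv track=rewrite | github.com/unboxing96/ALGO | 프로그래머스/3/84021. 퍼즐 조각 채우기/퍼즐 조각 채우기.py | find_table
-- ===== SOURCE A (Python) =====
-- def find_table(idx_list):
--     x_list, y_list = zip(*idx_list)
--     row = max(x_list) - min(x_list) + 1
--     col = max(y_list) - min(y_list) + 1
--     matrix = [[0] * col for _ in range(row)]
--
--     for x, y in idx_list:
--         matrix[x - min(x_list)][y - min(y_list)] = 1
--
--     return matrix
-- ===== SOURCE B (Python) =====
-- def find_table(idx_list):
--     min_x, min_y = idx_list[0]
--     max_x, max_y = min_x, min_y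
--     for x, y in idx_list[1:]:
--         min_x = x if x < min_x else min_x
--         max_x = x if x > max_x else max_x
--         min_y = y if y < min_y else min_y
--         max_y = y if y > max_y else max_y
--     coords = set(idx_list)
--     return [[1 if (x, y) in coords else 0 for y in range(min_y, max_y + 1)]
--             for x in range(min_x, max_x + 1)]
-- ===== Notes on version B (the rewrite author's own statement) =====
-- stated objective: alternative
-- what changed: B computes the bounding box in one explicit pass with four running accumulators (instead of A's zip + whole-list min()/max() calls), then builds the matrix directly with a nested comprehension over the actual coordinate ranges testing set membership, instead of allocating a zero matrix and mutating cells while looping over the coordinate list.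
import Mathlib
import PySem

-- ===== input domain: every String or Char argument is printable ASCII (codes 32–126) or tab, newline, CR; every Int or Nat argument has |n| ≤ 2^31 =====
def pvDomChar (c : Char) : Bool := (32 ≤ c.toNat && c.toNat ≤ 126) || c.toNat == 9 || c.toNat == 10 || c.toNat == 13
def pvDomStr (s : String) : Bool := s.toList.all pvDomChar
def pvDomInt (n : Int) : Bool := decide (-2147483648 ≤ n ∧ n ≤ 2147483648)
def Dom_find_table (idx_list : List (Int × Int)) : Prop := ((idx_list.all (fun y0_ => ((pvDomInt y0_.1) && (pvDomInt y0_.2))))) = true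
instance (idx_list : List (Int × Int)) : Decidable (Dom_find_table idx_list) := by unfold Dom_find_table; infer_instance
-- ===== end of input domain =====

-- B computes the bounding box in ONE pass with four running accumulators and builds the matrix
-- directly over the actual coordinate ranges via set membership, instead of A's zip + whole-list
-- min()/max() calls followed by allocating a zero matrix and mutating cells (objective: alternative).

-- ===== PORT A =====
-- loop body of A: matrix[x - min_x][y - min_y] = 1  (indices are always in range: min ≤ x ≤ max)
def pvMark (minX minY : Int) (m : List (List Int)) (p : Int × Int) : List (List Int) :=
  PySem.List.pySetD m (p.1 - minX)
    (PySem.List.pySetD (PySem.List.pyGetD m (p.1 - minX) []) (p.2 - minY) 1)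

def find_table (idx_list : List (Int × Int)) : List (List Int) :=
  let x_list := idx_list.map Prod.fst
  let y_list := idx_list.map Prod.snd
  -- min()/max() of an empty sequence raise ValueError; Pre_ excludes [], so the '.getD 0' arms are unreachable
  let minX := (PySem.List.min? x_list (fun v => v)).getD 0
  let minY := (PySem.List.min? y_list (fun v => v)).getD 0
  let row := (PySem.List.max? x_list (fun v => v)).getD 0 - minX + 1
  let col := (PySem.List.max? y_list (fun v => v)).getD 0 - minY + 1
  let matrix := (PySem.List.pyRange 0 row 1).map (fun _ => List.replicate col.toNat (0 : Int))
  idx_list.foldl (pvMark minX minY) matrix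

-- ===== PORT B =====
-- loop body of B: the four conditional updates of min_x, max_x, min_y, max_y
def pvStep (acc : Int × Int × Int × Int) (p : Int × Int) : Int × Int × Int × Int :=
  (if p.1 < acc.1 then p.1 else acc.1,
   if p.1 > acc.2.1 then p.1 else acc.2.1,
   if p.2 < acc.2.2.1 then p.2 else acc.2.2.1,
   if p.2 > acc.2.2.2 then p.2 else acc.2.2.2)

def find_table_alt (idx_list : List (Int × Int)) : List (List Int) :=
  -- idx_list[0] raises IndexError on []; Pre_ excludes [], so the default is unreachable
  let p0 := PySem.List.pyGetD idx_list 0 ((0 : Int), (0 : Int))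
  let b := (PySem.List.slice idx_list (some 1) none).foldl pvStep (p0.1, p0.1, p0.2, p0.2)
  let coords := PySem.Set.ofList idx_list
  (PySem.List.pyRange b.1 (b.2.1 + 1) 1).map (fun x =>
    (PySem.List.pyRange b.2.2.1 (b.2.2.2 + 1) 1).map (fun y =>
      if PySem.Set.contains coords (x, y) then (1 : Int) else 0))

-- ===== PRECONDITION & SPEC =====
-- Pre_ excludes only the empty list, on which A's 'zip(*idx_list)' unpacking raises ValueError
-- (and B's 'idx_list[0]' raises IndexError).
def Pre_find_table (idx_list : List (Int × Int)) : Prop := idx_list ≠ []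
instance (idx_list : List (Int × Int)) : Decidable (Pre_find_table idx_list) := by unfold Pre_find_table; infer_instance
def pvWitness_find_table : (List (Int × Int)) := [(2, 3), (2, 5), (4, 3)]

def Spec_find_table (idx_list : List (Int × Int)) (out : List (List Int)) : Prop := out = find_table_alt idx_list
instance (idx_list : List (Int × Int)) (out : List (List Int)) : Decidable (Spec_find_table idx_list out) := by unfold Spec_find_table; infer_instance

-- ===== CLAIM (what is proved, stated in full; the proofs are below) =====
def Claim_equal_find_table : Prop := ∀ (idx_list : List (Int × Int)), Dom_find_table idx_list → Pre_find_table idx_list → Spec_find_table idx_list (find_table idx_list)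

-- ===== LEMMAS AND PROOFS =====

theorem pv_getD_eq {α : Type} (L : List α) (d : α) {i : Nat} (h : i < L.length) :
    L.getD i d = L[i] := by
  rw [List.getD_eq_getElem?_getD, List.getElem?_eq_getElem h]; rfl

theorem pv_getD_set_eq {α : Type} (L : List α) (k : Nat) (r : α) (d : α) (h : k < L.length) :
    (L.set k r).getD k d = r := by
  rw [List.getD_eq_getElem?_getD, List.getElem?_set_self h]; rfl

theorem pv_getD_set_ne {α : Type} (L : List α) (k i : Nat) (r : α) (d : α) (h : k ≠ i) :
    (L.set k r).getD i d = L.getD i d := by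
  rw [List.getD_eq_getElem?_getD, List.getElem?_set_ne h, List.getD_eq_getElem?_getD]

theorem pv_fold_entry (mX mY : Int) (c : Nat) (l : List (Int × Int)) :
    ∀ (m : List (List Int)), (∀ r ∈ m, r.length = c) →
    (∀ p ∈ l, 0 ≤ p.1 - mX ∧ p.1 - mX < (m.length : Int) ∧ 0 ≤ p.2 - mY ∧ p.2 - mY < (c : Int)) →
    (l.foldl (pvMark mX mY) m).length = m.length ∧
    (∀ r ∈ l.foldl (pvMark mX mY) m, r.length = c) ∧
    ∀ i j : Nat, i < m.length → j < c →
      ((l.foldl (pvMark mX mY) m).getD i []).getD j 0 =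
        if ((i : Int) + mX, (j : Int) + mY) ∈ l then 1 else (m.getD i []).getD j 0 := by
  induction l with
  | nil =>
    intro m hrect _
    refine ⟨rfl, hrect, ?_⟩
    intro i j _ _; simp
  | cons p l ih =>
    intro m hrect hbnd
    obtain ⟨h1, h2, h3, h4⟩ := hbnd p (List.mem_cons_self)
    have hi0 : (p.1 - mX).toNat < m.length := by omega
    have hrow : PySem.List.pyGetD m (p.1 - mX) [] = m[(p.1 - mX).toNat] := by
      rw [PySem.List.pyGetD_eq_getElem m [] h1 (by simpa using h2)]
    have hm' : pvMark mX mY m p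
        = m.set (p.1 - mX).toNat (m[(p.1 - mX).toNat].set (p.2 - mY).toNat 1) := by
      rw [pvMark, hrow, PySem.List.pySetD_of_nonneg _ _ h3, PySem.List.pySetD_of_nonneg _ _ h1]
    have hrlen : m[(p.1 - mX).toNat].length = c := hrect _ (List.getElem_mem hi0)
    have hlen' : (pvMark mX mY m p).length = m.length := by rw [hm']; simp
    have hrect' : ∀ r ∈ pvMark mX mY m p, r.length = c := by
      rw [hm']; intro r hr
      rcases List.mem_or_eq_of_mem_set hr with h | h
      · exact hrect r h
      · subst h; simpa using hrlen
    have hbnd' : ∀ q ∈ l, 0 ≤ q.1 - mX ∧ q.1 - mX < ((pvMark mX mY m p).length : Int)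
        ∧ 0 ≤ q.2 - mY ∧ q.2 - mY < (c : Int) := by
      intro q hq; rw [hlen']; exact hbnd q (List.mem_cons_of_mem _ hq)
    obtain ⟨L1, L2, L3⟩ := ih (pvMark mX mY m p) hrect' hbnd'
    refine ⟨by rw [List.foldl_cons, L1, hlen'], by rw [List.foldl_cons]; exact L2, ?_⟩
    intro i j hi hj
    rw [List.foldl_cons, L3 i j (by rwa [hlen']) hj]
    have hentry' : ((pvMark mX mY m p).getD i []).getD j 0 =
        if (i : Int) = p.1 - mX ∧ (j : Int) = p.2 - mY then 1 else (m.getD i []).getD j 0 := by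
      rw [hm']
      by_cases hie : (p.1 - mX).toNat = i
      · subst hie
        rw [pv_getD_set_eq _ _ _ _ hi0]
        by_cases hje : (p.2 - mY).toNat = j
        · subst hje
          rw [pv_getD_set_eq _ _ _ _ (by rw [hrlen]; omega), if_pos (by omega)]
        · rw [pv_getD_set_ne _ _ _ _ _ hje, if_neg (by omega), pv_getD_eq m [] hi0]
      · rw [pv_getD_set_ne _ _ _ _ _ hie, if_neg (by omega)]
    rw [hentry']
    by_cases hmem : ((i : Int) + mX, (j : Int) + mY) ∈ l
    · rw [if_pos hmem, if_pos (List.mem_cons_of_mem _ hmem)]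
    · by_cases heq : ((i : Int) + mX, (j : Int) + mY) = p
      · have h5 : (i : Int) = p.1 - mX ∧ (j : Int) = p.2 - mY := by
          obtain ⟨ha, hb⟩ := Prod.ext_iff.mp heq
          exact ⟨by omega, by omega⟩
        rw [if_neg hmem, if_pos h5, if_pos (by simp [heq])]
      · have h5 : ¬((i : Int) = p.1 - mX ∧ (j : Int) = p.2 - mY) := by
          rintro ⟨ha, hb⟩; apply heq; rw [Prod.ext_iff]
          exact ⟨by omega, by omega⟩
        rw [if_neg hmem, if_neg h5, if_neg (by simp [List.mem_cons, heq, hmem])]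

-- B's loop step splits into four independent min/max folds
theorem pv_fold_split (l : List (Int × Int)) :
    ∀ a b c d : Int, l.foldl pvStep (a, b, c, d) =
      (l.foldl (fun m p => min m p.1) a, l.foldl (fun m p => max m p.1) b,
       l.foldl (fun m p => min m p.2) c, l.foldl (fun m p => max m p.2) d) := by
  induction l with
  | nil => intro a b c d; rfl
  | cons p l ih =>
    intro a b c d
    have hstep : pvStep (a, b, c, d) p = (min a p.1, max b p.1, min c p.2, max d p.2) := by
      simp only [pvStep, Prod.mk.injEq]
      refine ⟨?_, ?_, ?_, ?_⟩ <;> (split_ifs <;> omega)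
    rw [List.foldl_cons, hstep, ih]
    rfl

theorem pv_foldl_min_le (l : List Int) : ∀ a : Int,
    l.foldl min a ≤ a ∧ ∀ x ∈ l, l.foldl min a ≤ x := by
  induction l with
  | nil => intro a; exact ⟨le_refl a, by simp⟩
  | cons y l ih =>
    intro a
    obtain ⟨h1, h2⟩ := ih (min a y)
    refine ⟨le_trans h1 (by omega), ?_⟩
    intro x hx
    rcases List.mem_cons.mp hx with h | h
    · subst h; exact le_trans h1 (by omega)
    · exact h2 x h

theorem pv_foldl_min_mem (l : List Int) : ∀ a : Int,
    l.foldl min a = a ∨ l.foldl min a ∈ l := by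
  induction l with
  | nil => intro a; exact Or.inl rfl
  | cons y l ih =>
    intro a
    rw [List.foldl_cons]
    rcases ih (min a y) with h | h
    · rw [h]
      by_cases h' : a ≤ y
      · exact Or.inl (by omega)
      · exact Or.inr (by rw [min_eq_right (by omega)]; exact List.mem_cons_self)
    · exact Or.inr (List.mem_cons_of_mem _ h)

theorem pv_foldl_max_le (l : List Int) : ∀ a : Int,
    a ≤ l.foldl max a ∧ ∀ x ∈ l, x ≤ l.foldl max a := by
  induction l with
  | nil => intro a; exact ⟨le_refl a, by simp⟩
  | cons y l ih =>
    intro a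
    obtain ⟨h1, h2⟩ := ih (max a y)
    refine ⟨le_trans (by omega) h1, ?_⟩
    intro x hx
    rcases List.mem_cons.mp hx with h | h
    · subst h; exact le_trans (by omega) h1
    · exact h2 x h

theorem pv_foldl_max_mem (l : List Int) : ∀ a : Int,
    l.foldl max a = a ∨ l.foldl max a ∈ l := by
  induction l with
  | nil => intro a; exact Or.inl rfl
  | cons y l ih =>
    intro a
    rw [List.foldl_cons]
    rcases ih (max a y) with h | h
    · rw [h]
      by_cases h' : y ≤ a
      · exact Or.inl (by omega)
      · exact Or.inr (by rw [max_eq_right (by omega)]; exact List.mem_cons_self)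
    · exact Or.inr (List.mem_cons_of_mem _ h)

theorem find_table_spec : Claim_equal_find_table := by
  intro idx hdom hpre
  have hne : idx ≠ [] := hpre
  unfold Spec_find_table find_table find_table_alt
  obtain ⟨xmax, hxmax⟩ : ∃ v, PySem.List.max? (idx.map Prod.fst) (fun v => v) = some v := by
    cases h : PySem.List.max? (idx.map Prod.fst) (fun v => v) with
    | none => exact absurd ((PySem.List.max?_eq_none_iff _ _).mp h) (by simp [hne])
    | some v => exact ⟨v, rfl⟩
  obtain ⟨xmin, hxmin⟩ : ∃ v, PySem.List.min? (idx.map Prod.fst) (fun v => v) = some v := by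
    cases h : PySem.List.min? (idx.map Prod.fst) (fun v => v) with
    | none => exact absurd ((PySem.List.min?_eq_none_iff _ _).mp h) (by simp [hne])
    | some v => exact ⟨v, rfl⟩
  obtain ⟨ymax, hymax⟩ : ∃ v, PySem.List.max? (idx.map Prod.snd) (fun v => v) = some v := by
    cases h : PySem.List.max? (idx.map Prod.snd) (fun v => v) with
    | none => exact absurd ((PySem.List.max?_eq_none_iff _ _).mp h) (by simp [hne])
    | some v => exact ⟨v, rfl⟩
  obtain ⟨ymin, hymin⟩ : ∃ v, PySem.List.min? (idx.map Prod.snd) (fun v => v) = some v := by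
    cases h : PySem.List.min? (idx.map Prod.snd) (fun v => v) with
    | none => exact absurd ((PySem.List.min?_eq_none_iff _ _).mp h) (by simp [hne])
    | some v => exact ⟨v, rfl⟩
  simp only [hxmax, hxmin, hymax, hymin, Option.getD_some]
  have hxlo : ∀ q ∈ idx, xmin ≤ q.1 :=
    fun q hq => PySem.List.min?_isMin hxmin q.1 (List.mem_map_of_mem hq)
  have hxhi : ∀ q ∈ idx, q.1 ≤ xmax :=
    fun q hq => PySem.List.max?_isMax hxmax q.1 (List.mem_map_of_mem hq)
  have hylo : ∀ q ∈ idx, ymin ≤ q.2 :=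
    fun q hq => PySem.List.min?_isMin hymin q.2 (List.mem_map_of_mem hq)
  have hyhi : ∀ q ∈ idx, q.2 ≤ ymax :=
    fun q hq => PySem.List.max?_isMax hymax q.2 (List.mem_map_of_mem hq)
  -- B's single-pass bounds equal A's min/max
  obtain ⟨p0, rest, rfl⟩ : ∃ p0 rest, idx = p0 :: rest := by
    cases idx with
    | nil => exact absurd rfl hne
    | cons p0 rest => exact ⟨p0, rest, rfl⟩
  have hget0 : PySem.List.pyGetD (p0 :: rest) 0 ((0 : Int), (0 : Int)) = p0 := by
    simp [pysem]
  have hslice : PySem.List.slice (p0 :: rest) (some 1) none = rest := by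
    rw [PySem.List.slice_from_one]; rfl
  rw [hget0, hslice, pv_fold_split]
  have hminx : rest.foldl (fun m p => min m p.1) p0.1 = xmin := by
    rw [← List.foldl_map]
    obtain ⟨hle1, hle2⟩ := pv_foldl_min_le (rest.map Prod.fst) p0.1
    apply le_antisymm
    · have hx : xmin ∈ (p0 :: rest).map Prod.fst := PySem.List.min?_mem hxmin
      rcases List.mem_cons.mp hx with h | h
      · omega
      · exact hle2 _ h
    · rcases pv_foldl_min_mem (rest.map Prod.fst) p0.1 with h | h
      · rw [h]; exact hxlo p0 List.mem_cons_self
      · obtain ⟨q, hq, hq2⟩ := List.mem_map.mp h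
        rw [← hq2]; exact hxlo q (List.mem_cons_of_mem _ hq)
  have hmaxx : rest.foldl (fun m p => max m p.1) p0.1 = xmax := by
    rw [← List.foldl_map]
    obtain ⟨hle1, hle2⟩ := pv_foldl_max_le (rest.map Prod.fst) p0.1
    apply le_antisymm
    · rcases pv_foldl_max_mem (rest.map Prod.fst) p0.1 with h | h
      · rw [h]; exact hxhi p0 List.mem_cons_self
      · obtain ⟨q, hq, hq2⟩ := List.mem_map.mp h
        rw [← hq2]; exact hxhi q (List.mem_cons_of_mem _ hq)
    · have hx : xmax ∈ (p0 :: rest).map Prod.fst := PySem.List.max?_mem hxmax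
      rcases List.mem_cons.mp hx with h | h
      · omega
      · exact hle2 _ h
  have hminy : rest.foldl (fun m p => min m p.2) p0.2 = ymin := by
    rw [← List.foldl_map]
    obtain ⟨hle1, hle2⟩ := pv_foldl_min_le (rest.map Prod.snd) p0.2
    apply le_antisymm
    · have hx : ymin ∈ (p0 :: rest).map Prod.snd := PySem.List.min?_mem hymin
      rcases List.mem_cons.mp hx with h | h
      · omega
      · exact hle2 _ h
    · rcases pv_foldl_min_mem (rest.map Prod.snd) p0.2 with h | h
      · rw [h]; exact hylo p0 List.mem_cons_self
      · obtain ⟨q, hq, hq2⟩ := List.mem_map.mp h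
        rw [← hq2]; exact hylo q (List.mem_cons_of_mem _ hq)
  have hmaxy : rest.foldl (fun m p => max m p.2) p0.2 = ymax := by
    rw [← List.foldl_map]
    obtain ⟨hle1, hle2⟩ := pv_foldl_max_le (rest.map Prod.snd) p0.2
    apply le_antisymm
    · rcases pv_foldl_max_mem (rest.map Prod.snd) p0.2 with h | h
      · rw [h]; exact hyhi p0 List.mem_cons_self
      · obtain ⟨q, hq, hq2⟩ := List.mem_map.mp h
        rw [← hq2]; exact hyhi q (List.mem_cons_of_mem _ hq)
    · have hx : ymax ∈ (p0 :: rest).map Prod.snd := PySem.List.max?_mem hymax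
      rcases List.mem_cons.mp hx with h | h
      · omega
      · exact hle2 _ h
  rw [hminx, hmaxx, hminy, hmaxy]
  set idx := p0 :: rest with hidx
  have hp0 : p0 ∈ idx := List.mem_cons_self
  have hR0 : 0 ≤ xmax - xmin := by
    have := hxlo p0 hp0; have := hxhi p0 hp0; omega
  have hC0 : 0 ≤ ymax - ymin := by
    have := hylo p0 hp0; have := hyhi p0 hp0; omega
  set R : Int := xmax - xmin + 1 with hR
  set C : Int := ymax - ymin + 1 with hC
  set M0 : List (List Int) :=
    (PySem.List.pyRange 0 R 1).map (fun _ => List.replicate C.toNat (0 : Int)) with hM0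
  have hlenM0 : M0.length = R.toNat := by
    simp [hM0, PySem.List.length_pyRange_one]
  have hrectM0 : ∀ r ∈ M0, r.length = C.toNat := by
    intro r hr
    obtain ⟨a, _, rfl⟩ := List.mem_map.mp hr
    simp
  have hbnd : ∀ q ∈ idx, 0 ≤ q.1 - xmin ∧ q.1 - xmin < (M0.length : Int) ∧
      0 ≤ q.2 - ymin ∧ q.2 - ymin < ((C.toNat : Nat) : Int) := by
    intro q hq
    have := hxlo q hq; have := hxhi q hq; have := hylo q hq; have := hyhi q hq
    rw [hlenM0]
    refine ⟨by omega, by omega, by omega, by omega⟩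
  obtain ⟨E1, E2, E3⟩ := pv_fold_entry xmin ymin C.toNat idx M0 hrectM0 hbnd
  apply List.ext_getElem
  · rw [E1, hlenM0]; simp [PySem.List.length_pyRange_one]; omega
  · intro i h1 h2
    have hiR : i < R.toNat := by rwa [E1, hlenM0] at h1
    have hiM : i < M0.length := by rwa [E1] at h1
    apply List.ext_getElem
    · rw [E2 _ (List.getElem_mem h1)]
      simp [PySem.List.length_pyRange_one]; omega
    · intro j hj1 hj2
      have hjC : j < C.toNat := by rwa [E2 _ (List.getElem_mem h1)] at hj1
      have key := E3 i j hiM hjC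
      rw [pv_getD_eq _ [] h1] at key
      rw [List.getD_eq_getElem _ _ hj1] at key
      rw [key]
      have hM0entry : (M0.getD i []).getD j 0 = 0 := by
        rw [pv_getD_eq M0 [] hiM]
        obtain ⟨a, _, hEq⟩ := List.mem_map.mp (List.getElem_mem hiM)
        rw [← hEq]
        exact List.getD_replicate _ hjC
      rw [hM0entry]
      simp only [List.getElem_map, PySem.List.getElem_pyRange_one]
      simp [PySem.Set.contains, PySem.Set.mem_ofList, Int.add_comm]
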